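-- pv_equiv track=rewrite | github.com/kkr010128/codebert | problem117/problem117_132.py | solve
-- ===== SOURCE A (Python) =====
-- from bisect import bisect_right
--
-- def solve(N: int, M: int, K: int, A: "List[int]", B: "List[int]"):
--     A = [0] + A
--     for i in range(1, N + 1):
--         A[i] = A[i] + A[i - 1]
--     B = [0] + B
--     for i in range(1, M + 1):
--         B[i] = B[i] + B[i - 1]
--
--     answer = 0
--     for n in range(N+1):
--         ka = A[n]
--         if ka > K:
--             break
--         kb = K - ka  # ak > K だから kb >= 0  bisect_right > 0
--         m = bisect_right(B, kb) - 1
--         if n + m > answer: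
--             answer = n + m
--
--     return answer
-- ===== SOURCE B (Python) =====
-- def solve(N: int, M: int, K: int, A: "List[int]", B: "List[int]"):
--     # Offline batched search: collect the budget left after every affordable
--     # prefix of A, then answer all those queries with a single divide-and-conquer
--     # recursion over the summed array, instead of one binary search per prefix.
--     pb = [0] + B
--     for i in range(1, M + 1):
--         pb[i] += pb[i - 1]
--     kas = []
--     ka = 0
--     for n in range(N + 1):
--         if n:
--             ka += A[n - 1]
--         if ka > K:
--             break
--         kas.append(K - ka)
--     res = [0] * len(kas)
--     def go(qs, lo, hi):
--         if not qs:
--             return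
--         if lo >= hi:
--             for q in qs:
--                 res[q] = lo
--             return
--         mid = (lo + hi) // 2
--         y = pb[mid]
--         go([q for q in qs if kas[q] < y], lo, mid)
--         go([q for q in qs if kas[q] >= y], mid + 1, hi)
--     go(list(range(len(kas))), 0, len(pb))
--     best = 0
--     for n, m in enumerate(res):
--         best = max(best, n + m - 1)
--     return best
-- ===== Notes on version B (the rewrite author's own statement) =====
-- stated objective: alternative
-- what changed: B collects the budget left after every affordable prefix of A (running total instead of A's materialised prefix array) and answers all those lookups with a single offline divide-and-conquer recursion over the summed array, instead of calling bisect_right independently in every loop iteration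
import Mathlib
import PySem

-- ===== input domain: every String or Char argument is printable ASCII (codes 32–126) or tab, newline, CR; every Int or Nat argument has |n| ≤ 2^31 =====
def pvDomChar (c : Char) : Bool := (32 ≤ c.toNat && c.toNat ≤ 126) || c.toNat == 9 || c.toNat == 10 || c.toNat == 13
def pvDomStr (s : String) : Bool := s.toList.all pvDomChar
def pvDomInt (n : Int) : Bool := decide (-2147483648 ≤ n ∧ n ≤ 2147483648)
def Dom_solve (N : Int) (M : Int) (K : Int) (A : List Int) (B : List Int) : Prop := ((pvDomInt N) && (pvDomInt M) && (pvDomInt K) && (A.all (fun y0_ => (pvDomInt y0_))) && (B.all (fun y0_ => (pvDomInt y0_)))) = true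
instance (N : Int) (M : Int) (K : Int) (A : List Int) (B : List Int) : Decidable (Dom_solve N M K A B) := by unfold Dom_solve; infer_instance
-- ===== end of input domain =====

-- B answers all of the loop's budget queries with one offline divide-and-conquer recursion
-- over the summed array instead of an independent bisect_right per loop iteration, and scans
-- A with a running total instead of materialising A's prefix array (objective: alternative).

-- ===== PORT A =====
-- Python: X = [0] + X; for i in range(1, k+1): X[i] = X[i] + X[i-1]
def solvePrefix (k : Int) (X : List Int) : List Int :=
  (PySem.List.pyRange 1 (k + 1)).foldl
    (fun l i => l.set i.toNat (PySem.List.pyGetD l i 0 + PySem.List.pyGetD l (i - 1) 0))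
    (0 :: X)

-- Python: for n in range(N+1): ka = A[n]; if ka > K: break; m = bisect_right(B, K-ka)-1; answer update
def solveGoA (PA PB : List Int) (K : Int) : Nat → Nat → Int → Int
  | 0, _, ans => ans
  | r + 1, n, ans =>
    let ka := PA.getD n 0
    if ka > K then ans
    else
      let m : Int := (PySem.List.bisectRight PB (K - ka) : Int) - 1
      solveGoA PA PB K r (n + 1) (if (n : Int) + m > ans then (n : Int) + m else ans)

def solve (N : Int) (M : Int) (K : Int) (A : List Int) (B : List Int) : Int :=
  let PA := solvePrefix N A
  let PB := solvePrefix M B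
  solveGoA PA PB K (N + 1).toNat 0 0

-- ===== PORT B =====
-- Python: pb = [0] + B; for i in range(1, M+1): pb[i] += pb[i-1]
def pbBuild (M : Int) (B : List Int) : List Int :=
  (PySem.List.pyRange 1 (M + 1)).foldl
    (fun l i => l.set i.toNat (PySem.List.pyGetD l i 0 + PySem.List.pyGetD l (i - 1) 0))
    (0 :: B)

-- Python: kas = []; ka = 0; for n in range(N+1): if n: ka += A[n-1]; if ka > K: break; kas.append(K-ka)
def kasBuild (A : List Int) (K : Int) : Nat → Nat → Int → List Int → List Int
  | 0, _, _, acc => acc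
  | r + 1, n, ka, acc =>
    let ka' := if 0 < n then ka + PySem.List.pyGetD A ((n : Int) - 1) 0 else ka
    if ka' > K then acc
    else kasBuild A K r (n + 1) ka' (acc ++ [K - ka'])

-- Python: def go(qs, lo, hi): … (the offline divide-and-conquer; res threaded instead of mutated)
def goB (pb kas : List Int) (qs : List Nat) (lo hi : Nat) (res : List Nat) : List Nat :=
  if qs = [] then res
  else if hi ≤ lo then qs.foldl (fun r q => r.set q lo) res
  else  -- mid = (lo + hi) // 2, y = pb[mid] inlined below
    goB pb kas (qs.filter (fun q => ¬ kas.getD q 0 < pb.getD ((lo + hi) / 2) 0)) ((lo + hi) / 2 + 1) hi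
      (goB pb kas (qs.filter (fun q => kas.getD q 0 < pb.getD ((lo + hi) / 2) 0)) lo ((lo + hi) / 2) res)
termination_by hi - lo
decreasing_by all_goals omega

-- Python: best = 0; for n, m in enumerate(res): best = max(best, n + m - 1)
def bestGo : List Nat → Nat → Int → Int
  | [], _, best => best
  | m :: t, n, best => bestGo t (n + 1) (max best ((n : Int) + (m : Int) - 1))

def solve_alt (N : Int) (M : Int) (K : Int) (A : List Int) (B : List Int) : Int :=
  let pb := pbBuild M B
  let kas := kasBuild A K (N + 1).toNat 0 0 []
  let res := goB pb kas (List.range kas.length) 0 pb.length (List.replicate kas.length 0)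
  bestGo res 0 0

-- ===== PRECONDITION & SPEC =====
-- Pre_ is exactly A's domain: A raises IndexError in its prefix loops iff N > len(A) or M > len(B).
def Pre_solve (N : Int) (M : Int) (K : Int) (A : List Int) (B : List Int) : Prop :=
  N ≤ (A.length : Int) ∧ M ≤ (B.length : Int)
instance (N : Int) (M : Int) (K : Int) (A : List Int) (B : List Int) : Decidable (Pre_solve N M K A B) := by unfold Pre_solve; infer_instance

def pvWitness_solve : Int × Int × Int × List Int × List Int := (2, 2, 5, [1, 2], [3, 4])

def Spec_solve (N : Int) (M : Int) (K : Int) (A : List Int) (B : List Int) (out : Int) : Prop := out = solve_alt N M K A B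
instance (N : Int) (M : Int) (K : Int) (A : List Int) (B : List Int) (out : Int) : Decidable (Spec_solve N M K A B out) := by unfold Spec_solve; infer_instance

-- ===== CLAIM (what is proved, stated in full; the proofs are below) =====
def Claim_equal_solve : Prop := ∀ (N : Int) (M : Int) (K : Int) (A : List Int) (B : List Int), Dom_solve N M K A B → Pre_solve N M K A B → Spec_solve N M K A B (solve N M K A B)

-- ===== LEMMAS AND PROOFS =====

-- canonical prefix-sum list: psum a [x1,…,xk] = [a, a+x1, …, a+x1+…+xk]
def psum (a : Int) : List Int → List Int
  | [] => [a]
  | x :: t => a :: psum (a + x) t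

theorem psum_length (a : Int) (l : List Int) : (psum a l).length = l.length + 1 := by
  induction l generalizing a with
  | nil => rfl
  | cons x t ih => simp [psum, ih]

theorem psum_getD (a : Int) (l : List Int) (n : Nat) (h : n ≤ l.length) :
    (psum a l).getD n 0 = a + (l.take n).sum := by
  induction l generalizing a n with
  | nil =>
    have hn0 : n = 0 := by simpa using h
    subst hn0; simp [psum]
  | cons x t ih =>
    cases n with
    | zero => simp [psum]
    | succ k =>
      simp only [psum, List.getD_cons_succ, List.take_succ_cons, List.sum_cons]
      rw [ih (a + x) k (by simpa using h)]; ring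

theorem psum_append (a : Int) (l : List Int) (x : Int) :
    psum a (l ++ [x]) = psum a l ++ [a + l.sum + x] := by
  induction l generalizing a with
  | nil => simp [psum]
  | cons y t ih => simp [psum, ih]; ring_nf

-- the A-side in-place prefix loop
theorem solvePrefix_eq (k : Nat) (X : List Int) (hk : k ≤ X.length) :
    solvePrefix (k : Int) X = psum 0 (X.take k) ++ X.drop k := by
  induction k with
  | zero => simp [solvePrefix, PySem.List.pyRange, psum]
  | succ j ih =>
    have hj : j ≤ X.length := by omega
    have hrange : PySem.List.pyRange 1 ((j : Int) + 1 + 1) =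
        PySem.List.pyRange 1 ((j : Int) + 1) ++ [(j : Int) + 1] := by
      exact PySem.List.pyRange_one_succ_right (by omega)
    have hx : ∃ v, X[j]? = some v := by
      exact ⟨X[j], List.getElem?_eq_getElem (by omega)⟩
    obtain ⟨v, hv⟩ := hx
    have hdrop : X.drop j = v :: X.drop (j + 1) := by
      rw [List.drop_eq_getElem_cons (by omega)]
      simp [List.getElem?_eq_getElem (by omega : j < X.length)] at hv
      simp [hv]
    have htake : X.take (j + 1) = X.take j ++ [v] := by
      rw [List.take_succ, hv]; rfl
    unfold solvePrefix at ih ⊢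
    push_cast
    rw [hrange, List.foldl_append, ih hj]
    have hlenP : (psum 0 (X.take j)).length = j + 1 := by
      rw [psum_length, List.length_take]; omega
    have hget1 : PySem.List.pyGetD (psum 0 (X.take j) ++ X.drop j) ((j : Int) + 1) 0 = v := by
      rw [PySem.List.pyGetD_of_nonneg _ _ (by omega)]
      rw [show ((j : Int) + 1).toNat = j + 1 by omega, hdrop]
      rw [List.getD_eq_getElem _ _ (by simp [hlenP])]
      rw [List.getElem_append_right (by omega)]
      simp [hlenP]
    have hget0 : PySem.List.pyGetD (psum 0 (X.take j) ++ X.drop j) ((j : Int) + 1 - 1) 0 = (X.take j).sum := by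
      rw [PySem.List.pyGetD_of_nonneg _ _ (by omega)]
      rw [show ((j : Int) + 1 - 1).toNat = j by omega]
      rw [List.getD_append _ _ _ _ (by omega)]
      rw [psum_getD 0 _ j (by simp [List.length_take]; omega)]
      simp [List.take_take]
    simp only [List.foldl_cons, List.foldl_nil, hget1, hget0]
    rw [show ((j : Int) + 1).toNat = j + 1 by omega]
    rw [hdrop, List.set_append]
    simp only [hlenP, lt_irrefl, if_neg (lt_irrefl _)]
    rw [show j + 1 - (j + 1) = 0 by omega]
    rw [htake, psum_append]
    simp [hdrop]
    ring_nf

theorem solvePrefix_eq' (k : Int) (X : List Int) (hk : k ≤ (X.length : Int)) :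
    solvePrefix k X = psum 0 (X.take k.toNat) ++ X.drop k.toNat := by
  by_cases h0 : 0 ≤ k
  · have := solvePrefix_eq k.toNat X (by omega)
    rwa [Int.toNat_of_nonneg h0] at this
  · have hz : k.toNat = 0 := by omega
    rw [hz]
    simp only [List.take_zero, List.drop_zero, psum]
    unfold solvePrefix
    rw [show PySem.List.pyRange 1 (k + 1) = [] from by
      rw [PySem.List.pyRange_of_pos 1 (k + 1) one_pos, if_neg (by omega)]
      rfl]
    rfl

-- the two in-place prefix loops are the same code
theorem pbBuild_eq_solvePrefix (M : Int) (B : List Int) : pbBuild M B = solvePrefix M B := rfl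

-- the fuelled binary-search loop ignores any fuel ≥ hi - lo … proved on the fly below;
-- first the base-case fold of goB, pointwise
theorem foldl_set_getD (lo : Nat) :
    ∀ (qs : List Nat) (res : List Nat) (j : Nat), j < res.length →
      (qs.foldl (fun r q => r.set q lo) res).getD j 0
        = if j ∈ qs then lo else res.getD j 0 := by
  intro qs
  induction qs with
  | nil => intro res j hj; simp
  | cons q t ih =>
    intro res j hj
    rw [List.foldl_cons, ih (res.set q lo) j (by simpa using hj)]
    by_cases hjq : j = q
    · subst hjq
      simp only [List.mem_cons, true_or, if_pos]
      by_cases hjt : j ∈ t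
      · rw [if_pos hjt]
      · rw [if_neg hjt, List.getD_eq_getElem _ _ (by simpa using hj),
          List.getElem_set_self]
    · by_cases hjt : j ∈ t
      · simp [hjt]
      · have : j ∉ (q :: t) := by simp [hjq, hjt]
        rw [if_neg hjt, if_neg this]
        rw [List.getD_eq_getElem _ _ (by simpa using hj),
          List.getD_eq_getElem _ _ hj, List.getElem_set_ne (by omega)]

theorem foldl_set_length (lo : Nat) :
    ∀ (qs : List Nat) (res : List Nat),
      (qs.foldl (fun r q => r.set q lo) res).length = res.length := by
  intro qs
  induction qs with
  | nil => intro res; rfl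
  | cons q t ih => intro res; rw [List.foldl_cons, ih]; simp

-- goB preserves the length of res
theorem goB_length (pb kas : List Int) :
    ∀ (lo hi : Nat) (qs : List Nat) (res : List Nat),
      (goB pb kas qs lo hi res).length = res.length := by
  intro lo hi
  induction hlh : hi - lo using Nat.strong_induction_on generalizing lo hi with
  | _ d ih =>
    intro qs res
    rw [goB]
    by_cases h1 : qs = []
    · rw [if_pos h1]
    · rw [if_neg h1]
      by_cases h2 : hi ≤ lo
      · rw [if_pos h2]
        exact foldl_set_length lo qs res
      · rw [if_neg h2]
        rw [ih (hi - ((lo + hi) / 2 + 1)) (by omega) ((lo + hi) / 2 + 1) hi rfl,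
          ih ((lo + hi) / 2 - lo) (by omega) lo ((lo + hi) / 2) rfl]

-- goB computes, at each queried index, exactly the binary-search value of its key
theorem goB_getD (pb kas : List Int) :
    ∀ (lo hi : Nat) (qs : List Nat) (res : List Nat) (j : Nat) (f : Nat),
      hi ≤ pb.length → hi - lo ≤ f → j < res.length →
      (goB pb kas qs lo hi res).getD j 0
        = if j ∈ qs then PySem.List.bisectRightLoop pb (kas.getD j 0) f lo hi
          else res.getD j 0 := by
  intro lo hi
  induction hlh : hi - lo using Nat.strong_induction_on generalizing lo hi with
  | _ d ih =>
    intro qs res j f hhi hf hj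
    rw [goB]
    by_cases h1 : qs = []
    · subst h1
      rw [if_pos rfl, if_neg (by simp)]
    · rw [if_neg h1]
      by_cases h2 : hi ≤ lo
      · rw [if_pos h2, foldl_set_getD lo qs res j hj]
        have hloop : PySem.List.bisectRightLoop pb (kas.getD j 0) f lo hi = lo := by
          cases f with
          | zero => rfl
          | succ g =>
            rw [PySem.List.bisectRightLoop]
            rw [if_neg (by omega)]
        rw [hloop]
      · rw [if_neg h2]
        have hlt : lo < hi := by omega
        have hmid : (lo + hi) / 2 < hi := by omega
        have hmlo : lo ≤ (lo + hi) / 2 := by omega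
        have hmlen : (lo + hi) / 2 < pb.length := by omega
        cases f with
        | zero => omega
        | succ g =>
          have hget : pb[(lo + hi) / 2]? = some (pb.getD ((lo + hi) / 2) 0) := by
            rw [List.getD_eq_getElem _ _ hmlen]
            exact List.getElem?_eq_getElem hmlen
          have hloop : PySem.List.bisectRightLoop pb (kas.getD j 0) (g + 1) lo hi
              = if kas.getD j 0 < pb.getD ((lo + hi) / 2) 0
                then PySem.List.bisectRightLoop pb (kas.getD j 0) g lo ((lo + hi) / 2)
                else PySem.List.bisectRightLoop pb (kas.getD j 0) g ((lo + hi) / 2 + 1) hi := by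
            rw [PySem.List.bisectRightLoop, if_pos hlt, hget]
          have hlen1 : j < (goB pb kas (qs.filter (fun q => kas.getD q 0 < pb.getD ((lo + hi) / 2) 0)) lo ((lo + hi) / 2) res).length := by
            rw [goB_length]; exact hj
          rw [ih (hi - ((lo + hi) / 2 + 1)) (by omega) ((lo + hi) / 2 + 1) hi rfl _ _ j g
              hhi (by omega) hlen1]
          rw [ih ((lo + hi) / 2 - lo) (by omega) lo ((lo + hi) / 2) rfl _ _ j g
              (by omega) (by omega) hj]
          simp only [List.mem_filter, decide_eq_true_eq]
          by_cases hjq : j ∈ qs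
          · by_cases hcmp : kas.getD j 0 < pb.getD ((lo + hi) / 2) 0
            · rw [if_neg (fun h => h.2 hcmp), if_pos ⟨hjq, hcmp⟩, if_pos hjq,
                hloop, if_pos hcmp]
            · rw [if_pos ⟨hjq, hcmp⟩, if_pos hjq, hloop, if_neg hcmp]
          · rw [if_neg (fun h => hjq h.1), if_neg (fun h => hjq h.1), if_neg hjq]

-- the result array of the top-level goB call is the per-key binary-search map
theorem goB_top (pb kas : List Int) :
    goB pb kas (List.range kas.length) 0 pb.length (List.replicate kas.length 0)
      = kas.map (fun x => PySem.List.bisectRight pb x) := by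
  apply List.ext_getElem
  · rw [goB_length]; simp
  · intro j h1 h2
    have hjlen : j < kas.length := by simpa using h2
    have hlenr : j < (List.replicate kas.length (0 : Nat)).length := by simpa using hjlen
    have := goB_getD pb kas 0 pb.length (List.range kas.length)
      (List.replicate kas.length 0) j pb.length (le_refl _) (by omega) hlenr
    rw [if_pos (by simpa using hjlen)] at this
    rw [← List.getD_eq_getElem _ 0 h1, this]
    rw [List.getElem_map]
    rw [List.getD_eq_getElem _ _ hjlen]
    rfl

-- appending to kasBuild's accumulator commutes out
theorem kasBuild_acc (A : List Int) (K : Int) :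
    ∀ (r n : Nat) (ka : Int) (acc : List Int),
      kasBuild A K r n ka acc = acc ++ kasBuild A K r n ka [] := by
  intro r
  induction r with
  | zero => intro n ka acc; simp [kasBuild]
  | succ q ih =>
    intro n ka acc
    rw [kasBuild, kasBuild]
    by_cases hbk : (if 0 < n then ka + PySem.List.pyGetD A ((n : Int) - 1) 0 else ka) > K
    · simp only [hbk, if_pos, List.append_nil]
    · simp only [hbk, if_neg, if_false]
      rw [ih, ih _ _ ([] ++ [_])]
      simp

-- the A loop equals: build the query list, binary-search each key, fold the best
theorem loop_eq (A pb : List Int) (N K : Int) (hN : N ≤ (A.length : Int)) :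
    ∀ (r n : Nat) (best : Int), n + r ≤ N.toNat + 1 →
      solveGoA (psum 0 (A.take N.toNat) ++ A.drop N.toNat) pb K r n best
        = bestGo ((kasBuild A K r n (if n = 0 then 0 else (A.take (n - 1)).sum) []).map
            (fun x => PySem.List.bisectRight pb x)) n best := by
  intro r
  induction r with
  | zero => intro n best _; rfl
  | succ q ih =>
    intro n best hn
    have hnN : n ≤ N.toNat := by omega
    have hka : (psum 0 (A.take N.toNat) ++ A.drop N.toNat).getD n 0 = (A.take n).sum := by
      rw [List.getD_append _ _ _ _ (by rw [psum_length, List.length_take]; omega)]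
      rw [psum_getD 0 _ n (by simp [List.length_take]; omega)]
      rw [List.take_take, show min n N.toNat = n by omega]
      simp
    have hka' : (if 0 < n then (if n = 0 then 0 else (A.take (n - 1)).sum)
          + PySem.List.pyGetD A ((n : Int) - 1) 0
        else (if n = 0 then 0 else (A.take (n - 1)).sum)) = (A.take n).sum := by
      cases n with
      | zero => simp
      | succ p =>
        have hp : p < A.length := by omega
        rw [if_pos (by omega), if_neg (by omega)]
        rw [show ((p + 1 : Nat) : Int) - 1 = (p : Int) by push_cast; ring]
        rw [PySem.List.pyGetD_of_nonneg _ _ (by omega), Int.toNat_natCast,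
          List.getD_eq_getElem _ _ hp]
        rw [show p + 1 - 1 = p from rfl, List.sum_take_succ A p hp]
    rw [solveGoA, kasBuild]
    simp only [hka, hka']
    by_cases hbk : (A.take n).sum > K
    · rw [if_pos hbk, if_pos hbk]
      rfl
    · rw [if_neg hbk, if_neg hbk]
      rw [kasBuild_acc, List.nil_append, List.singleton_append, List.map_cons]
      rw [show bestGo ((PySem.List.bisectRight pb (K - (A.take n).sum) : Nat)
            :: (kasBuild A K q (n + 1) (A.take n).sum []).map (fun x => PySem.List.bisectRight pb x)) n best
          = bestGo ((kasBuild A K q (n + 1) (A.take n).sum []).map (fun x => PySem.List.bisectRight pb x))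
              (n + 1) (max best ((n : Int) + (PySem.List.bisectRight pb (K - (A.take n).sum) : Int) - 1)) from rfl]
      rw [ih (n + 1) _ (by omega)]
      have hmax : (if (n : Int) + ((PySem.List.bisectRight pb (K - (A.take n).sum) : Int) - 1) > best
            then (n : Int) + ((PySem.List.bisectRight pb (K - (A.take n).sum) : Int) - 1) else best)
          = max best ((n : Int) + (PySem.List.bisectRight pb (K - (A.take n).sum) : Int) - 1) := by
        omega
      rw [hmax, if_neg (by omega)]
      simp only [Nat.add_sub_cancel]

-- ===== VERDICT (by name: the statement is the Claim_ definition above) =====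
theorem solve_spec : Claim_equal_solve := by
  intro N M K A B _ hpre
  obtain ⟨hN, hM⟩ := hpre
  unfold Spec_solve solve solve_alt
  show solveGoA (solvePrefix N A) (solvePrefix M B) K (N + 1).toNat 0 0
      = bestGo (goB (pbBuild M B) (kasBuild A K (N + 1).toNat 0 0 [])
          (List.range (kasBuild A K (N + 1).toNat 0 0 []).length) 0 (pbBuild M B).length
          (List.replicate (kasBuild A K (N + 1).toNat 0 0 []).length 0)) 0 0
  rw [pbBuild_eq_solvePrefix, goB_top]
  rw [solvePrefix_eq' N A hN]
  have := loop_eq A (solvePrefix M B) N K hN (N + 1).toNat 0 0 (by omega)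
  simpa using this
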